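-- pv_equiv track=rewrite | github.com/IgorBio/Rogue | domain/key_door_system.py | _get_accessible_rooms_with_keys
-- ===== SOURCE A (Python) =====
-- from collections import deque
--
-- def _get_accessible_rooms_with_keys(graph, start_room, blocked_corridors, collected_keys):
--     """
--     Find all rooms accessible with a set of collected keys.
--
--     Args:
--         graph: Room connectivity graph
--         start_room (int): Starting room index
--         blocked_corridors (dict): Maps corridor_idx to required key color
--         collected_keys (set): Set of collected KeyColor values
--
--     Returns:
--         set: Set of accessible room indices
--     """
--     accessible = set()
--     queue = deque([start_room])
--     accessible.add(start_room)
--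
--     while queue:
--         current = queue.popleft()
--
--         for neighbor, corridor_idx in graph[current]:
--             if corridor_idx in blocked_corridors:
--                 required_key = blocked_corridors[corridor_idx]
--
--                 if required_key not in collected_keys:
--                     continue
--
--             if neighbor not in accessible:
--                 accessible.add(neighbor)
--                 queue.append(neighbor)
--
--     return accessible
-- ===== SOURCE B (Python) =====
-- def _get_accessible_rooms_with_keys(graph, start_room, blocked_corridors, collected_keys):
--     """Fixed-point saturation (no queue/worklist): repeatedly sweep over all
--     currently accessible rooms, relaxing every passable corridor out of them,
--     until the accessible set stops growing."""
--     accessible = {start_room}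
--     changed = True
--     while changed:
--         changed = False
--         for room in list(accessible):
--             for neighbor, corridor_idx in graph[room]:
--                 if ((corridor_idx not in blocked_corridors
--                         or blocked_corridors[corridor_idx] in collected_keys)
--                         and neighbor not in accessible):
--                     accessible.add(neighbor)
--                     changed = True
--     return accessible
-- ===== Notes on version B (the rewrite author's own statement) =====
-- stated objective: alternative
-- what changed: Replaces the deque-driven BFS worklist with a fixed-point saturation: each sweep relaxes every passable corridor out of every currently accessible room, repeating until the accessible set stops growing; no queue, frontier or visited bookkeeping beyond the result set.
import Mathlib
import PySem

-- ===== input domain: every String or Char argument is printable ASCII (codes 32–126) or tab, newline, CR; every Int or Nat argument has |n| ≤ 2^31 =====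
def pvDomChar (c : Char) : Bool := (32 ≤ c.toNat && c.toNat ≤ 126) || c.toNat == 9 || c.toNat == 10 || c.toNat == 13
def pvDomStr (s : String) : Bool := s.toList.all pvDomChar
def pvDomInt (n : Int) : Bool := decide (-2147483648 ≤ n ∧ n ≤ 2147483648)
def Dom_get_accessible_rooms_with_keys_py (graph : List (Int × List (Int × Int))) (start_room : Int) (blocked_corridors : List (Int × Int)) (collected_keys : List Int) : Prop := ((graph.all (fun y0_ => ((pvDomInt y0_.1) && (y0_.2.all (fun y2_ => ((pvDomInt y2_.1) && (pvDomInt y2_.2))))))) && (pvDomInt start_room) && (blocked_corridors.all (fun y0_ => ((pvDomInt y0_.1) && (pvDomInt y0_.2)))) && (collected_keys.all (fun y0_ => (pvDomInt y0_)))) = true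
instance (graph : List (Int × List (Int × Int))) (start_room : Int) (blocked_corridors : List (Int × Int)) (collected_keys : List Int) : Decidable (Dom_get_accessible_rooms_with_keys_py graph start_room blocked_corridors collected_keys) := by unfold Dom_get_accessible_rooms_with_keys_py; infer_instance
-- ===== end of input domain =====

-- B replaces A's deque-driven BFS by a fixed-point saturation: every sweep relaxes all
-- passable corridors out of every currently accessible room, until the set stops growing.
-- Objective: alternative algorithm, no speed claim.
-- Both Python functions return a SET; Python's set iteration order is not modelled by PySem,
-- so both ports return the set's elements in the canonical sorted order.

-- ===== PORT A =====
-- inner 'for neighbor, corridor_idx in graph[current]' body of A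
def pvStepA (blocked_corridors : List (Int × Int)) (collected_keys : List Int)
    (st : List Int × List Int) (nc : Int × Int) : List Int × List Int :=
  if (match (PySem.Dict.mk blocked_corridors).get? nc.2 with
      | some required_key => !collected_keys.contains required_key
      | none => false) then st           -- 'continue'
  else if PySem.Set.contains st.1 nc.1 then st
  else (PySem.Set.add st.1 nc.1, st.2 ++ [nc.1])

-- 'while queue:' loop of A; fuel only makes the recursion structural (never exhausted, see proofs)
def pvBfsA (graph : List (Int × List (Int × Int))) (blocked_corridors : List (Int × Int))
    (collected_keys : List Int) : Nat → List Int → List Int → List Int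
  | 0, accessible, _ => accessible
  | _ + 1, accessible, [] => accessible
  | fuel + 1, accessible, current :: rest =>
    let st := ((PySem.Dict.mk graph).getD current []).foldl
      (pvStepA blocked_corridors collected_keys) (accessible, rest)
    pvBfsA graph blocked_corridors collected_keys fuel st.1 st.2

def get_accessible_rooms_with_keys_py (graph : List (Int × List (Int × Int))) (start_room : Int) (blocked_corridors : List (Int × Int)) (collected_keys : List Int) : List Int :=
  PySem.List.sorted
    (pvBfsA graph blocked_corridors collected_keys
      (2 * (graph.flatMap (fun p => p.2.map Prod.fst)).length + 2)
      (PySem.Set.add PySem.Set.empty start_room) [start_room])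
    (fun x => x) false

-- ===== PORT B =====
-- the corridor guard of Source B: 'corridor_idx not in blocked_corridors or blocked_corridors[corridor_idx] in collected_keys'
def pvPassB (blocked_corridors : List (Int × Int)) (collected_keys : List Int) (c : Int) : Bool :=
  match (PySem.Dict.mk blocked_corridors).get? c with
  | some required => collected_keys.contains required
  | none => true

-- body of 'for neighbor, corridor_idx in graph[room]' of Source B (state = (accessible, changed))
def pvEdgeB (blocked_corridors : List (Int × Int)) (collected_keys : List Int)
    (st : List Int × Bool) (nc : Int × Int) : List Int × Bool :=
  if pvPassB blocked_corridors collected_keys nc.2 && !PySem.Set.contains st.1 nc.1 then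
    (PySem.Set.add st.1 nc.1, true)
  else st

-- body of 'for room in list(accessible)' of Source B
def pvRoomB (graph : List (Int × List (Int × Int))) (blocked_corridors : List (Int × Int))
    (collected_keys : List Int) (st : List Int × Bool) (room : Int) : List Int × Bool :=
  ((PySem.Dict.mk graph).getD room []).foldl (pvEdgeB blocked_corridors collected_keys) st

-- 'while changed:' loop of Source B; fuel only makes the recursion structural (never exhausted, see proofs)
def pvSatB (graph : List (Int × List (Int × Int))) (blocked_corridors : List (Int × Int))
    (collected_keys : List Int) : Nat → List Int → List Int
  | 0, accessible => accessible
  | fuel + 1, accessible =>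
    let st := accessible.foldl (pvRoomB graph blocked_corridors collected_keys) (accessible, false)
    if st.2 then pvSatB graph blocked_corridors collected_keys fuel st.1 else st.1

def get_accessible_rooms_with_keys_py_alt (graph : List (Int × List (Int × Int))) (start_room : Int) (blocked_corridors : List (Int × Int)) (collected_keys : List Int) : List Int :=
  PySem.List.sorted
    (pvSatB graph blocked_corridors collected_keys
      ((graph.map (fun p => p.2.length)).sum + 2)
      (PySem.Set.ofList [start_room]))
    (fun x => x) false

-- ===== PRECONDITION & SPEC =====
-- the rooms A ever dequeues (and B ever sweeps): the fixpoint of one-step passable-neighbor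
-- expansion from start_room (reached after at most |graph| + 2 iterations)
def pvReachable (graph : List (Int × List (Int × Int))) (blocked_corridors : List (Int × Int))
    (collected_keys : List Int) (start_room : Int) : List Int :=
  ((fun S => PySem.Set.update S (S.flatMap (fun u =>
      ((PySem.Dict.mk graph).getD u []).filterMap (fun nc =>
        if pvPassB blocked_corridors collected_keys nc.2 then some nc.1 else none))))^[graph.length + 2])
    [start_room]

-- Python's graph[room] raises KeyError when a reached room is not a key of graph (in A when it
-- is dequeued, in B when it is swept); Pre_ requires every room reachable from start_room
-- through passable corridors to be a key — exactly the inputs on which both Pythons return.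
def Pre_get_accessible_rooms_with_keys_py (graph : List (Int × List (Int × Int))) (start_room : Int) (blocked_corridors : List (Int × Int)) (collected_keys : List Int) : Prop :=
  ((pvReachable graph blocked_corridors collected_keys start_room).all
    (fun v => (PySem.Dict.mk graph).contains v)) = true
instance (graph : List (Int × List (Int × Int))) (start_room : Int) (blocked_corridors : List (Int × Int)) (collected_keys : List Int) : Decidable (Pre_get_accessible_rooms_with_keys_py graph start_room blocked_corridors collected_keys) := by unfold Pre_get_accessible_rooms_with_keys_py; infer_instance

def pvWitness_get_accessible_rooms_with_keys_py : (List (Int × List (Int × Int))) × Int × (List (Int × Int)) × List Int :=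
  ([(0, [(1, 0)]), (1, [])], 0, [(0, 5)], [5])

def Spec_get_accessible_rooms_with_keys_py (graph : List (Int × List (Int × Int))) (start_room : Int) (blocked_corridors : List (Int × Int)) (collected_keys : List Int) (out : List Int) : Prop := out = get_accessible_rooms_with_keys_py_alt graph start_room blocked_corridors collected_keys
instance (graph : List (Int × List (Int × Int))) (start_room : Int) (blocked_corridors : List (Int × Int)) (collected_keys : List Int) (out : List Int) : Decidable (Spec_get_accessible_rooms_with_keys_py graph start_room blocked_corridors collected_keys out) := by unfold Spec_get_accessible_rooms_with_keys_py; infer_instance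

-- ===== CLAIM (what is proved, stated in full; the proofs are below) =====
def Claim_equal_get_accessible_rooms_with_keys_py : Prop := ∀ (graph : List (Int × List (Int × Int))) (start_room : Int) (blocked_corridors : List (Int × Int)) (collected_keys : List Int), Dom_get_accessible_rooms_with_keys_py graph start_room blocked_corridors collected_keys → Pre_get_accessible_rooms_with_keys_py graph start_room blocked_corridors collected_keys → Spec_get_accessible_rooms_with_keys_py graph start_room blocked_corridors collected_keys (get_accessible_rooms_with_keys_py graph start_room blocked_corridors collected_keys)

-- ===== LEMMAS AND PROOFS =====

theorem pvWitness_ok :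
    Dom_get_accessible_rooms_with_keys_py (pvWitness_get_accessible_rooms_with_keys_py.1) (pvWitness_get_accessible_rooms_with_keys_py.2.1) (pvWitness_get_accessible_rooms_with_keys_py.2.2.1) (pvWitness_get_accessible_rooms_with_keys_py.2.2.2)
    ∧ Pre_get_accessible_rooms_with_keys_py (pvWitness_get_accessible_rooms_with_keys_py.1) (pvWitness_get_accessible_rooms_with_keys_py.2.1) (pvWitness_get_accessible_rooms_with_keys_py.2.2.1) (pvWitness_get_accessible_rooms_with_keys_py.2.2.2) := by
  decide

-- all rooms that can ever be added beyond the start: the neighbors listed in graph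
def pvU (graph : List (Int × List (Int × Int))) : List Int :=
  graph.flatMap (fun p => p.2.map Prod.fst)

-- how many of them are accessible already
def pvI (graph : List (Int × List (Int × Int))) (acc : List Int) : Nat :=
  (acc.toFinset ∩ (pvU graph).toFinset).card

-- termination measure of A's loop state
def pvM (graph : List (Int × List (Int × Int))) (acc q : List Int) : Nat :=
  q.length + 2 * ((pvU graph).toFinset.card - pvI graph acc)

-- the passable-edge relation (via A's adjacency lookup)
def pvE (graph : List (Int × List (Int × Int))) (b : List (Int × Int)) (k : List Int)
    (u v : Int) : Prop :=
  ∃ c, (v, c) ∈ (PySem.Dict.mk graph).getD u [] ∧ pvPassB b k c = true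

-- reachability along passable edges
inductive pvReach (graph : List (Int × List (Int × Int))) (b : List (Int × Int)) (k : List Int)
    (s : Int) : Int → Prop
  | refl : pvReach graph b k s s
  | tail {v w : Int} : pvReach graph b k s v → pvE graph b k v w → pvReach graph b k s w

theorem pv_adj_subset (graph : List (Int × List (Int × Int))) (room : Int) :
    ∀ p ∈ (PySem.Dict.mk graph).getD room [], p.1 ∈ pvU graph := by
  induction graph with
  | nil => intro p hp; simp [PySem.Dict.getD, PySem.Dict.get?] at hp
  | cons q g ih =>
    intro p hp
    rw [PySem.Dict.getD_eq_get?_getD, PySem.Dict.get?_mk_cons] at hp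
    simp only [pvU, List.flatMap_cons, List.mem_append]
    by_cases h : q.1 == room
    · rw [if_pos h] at hp
      simp only [Option.getD_some] at hp
      exact Or.inl (List.mem_map.mpr ⟨p, hp, rfl⟩)
    · rw [if_neg h] at hp
      exact Or.inr (ih p (by rw [PySem.Dict.getD_eq_get?_getD]; exact hp))

theorem pvI_le (graph : List (Int × List (Int × Int))) (acc : List Int) :
    pvI graph acc ≤ (pvU graph).toFinset.card :=
  Finset.card_le_card Finset.inter_subset_right

theorem pvI_mono (graph : List (Int × List (Int × Int))) {a c : List Int}
    (h : ∀ x ∈ a, x ∈ c) : pvI graph a ≤ pvI graph c := by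
  refine Finset.card_le_card ?_
  intro x hx
  rw [Finset.mem_inter] at hx ⊢
  exact ⟨List.mem_toFinset.mpr (h x (List.mem_toFinset.mp hx.1)), hx.2⟩

-- A's step in two-way form
theorem pvStepA_eq (b : List (Int × Int)) (k : List Int) (acc q : List Int) (n c : Int) :
    pvStepA b k (acc, q) (n, c)
      = if pvPassB b k c && !PySem.Set.contains acc n then
          (PySem.Set.add acc n, q ++ [n]) else (acc, q) := by
  unfold pvStepA pvPassB
  cases hreq : (PySem.Dict.mk b).get? c with
  | none => cases hc : PySem.Set.contains acc n <;> simp_all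
  | some r =>
    cases hk : k.contains r <;> cases hc : PySem.Set.contains acc n <;> simp_all

-- ---- properties of A's inner fold ----

theorem pvFoldA_grow (b : List (Int × Int)) (k : List Int) :
    ∀ (es : List (Int × Int)) (acc q : List Int) (x : Int), x ∈ acc →
      x ∈ (es.foldl (pvStepA b k) (acc, q)).1 := by
  intro es
  induction es with
  | nil => intro acc q x hx; exact hx
  | cons e es ih =>
    intro acc q x hx
    obtain ⟨n, c⟩ := e
    simp only [List.foldl_cons, pvStepA_eq]
    by_cases hcond : (pvPassB b k c && !PySem.Set.contains acc n) = true
    · rw [if_pos hcond]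
      refine ih _ _ _ ?_
      rw [PySem.Set.add_eq_ite]
      split
      · exact hx
      · exact List.mem_append_left _ hx
    · rw [if_neg hcond]
      exact ih _ _ _ hx

theorem pvFoldA_queue_grow (b : List (Int × Int)) (k : List Int) :
    ∀ (es : List (Int × Int)) (acc q : List Int) (x : Int), x ∈ q →
      x ∈ (es.foldl (pvStepA b k) (acc, q)).2 := by
  intro es
  induction es with
  | nil => intro acc q x hx; exact hx
  | cons e es ih =>
    intro acc q x hx
    obtain ⟨n, c⟩ := e
    simp only [List.foldl_cons, pvStepA_eq]
    by_cases hcond : (pvPassB b k c && !PySem.Set.contains acc n) = true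
    · rw [if_pos hcond]
      exact ih _ _ _ (List.mem_append_left _ hx)
    · rw [if_neg hcond]
      exact ih _ _ _ hx

theorem pvFoldA_queue (b : List (Int × Int)) (k : List Int) :
    ∀ (es : List (Int × Int)) (acc q : List Int) (x : Int),
      x ∈ (es.foldl (pvStepA b k) (acc, q)).2 →
      x ∈ q ∨ x ∈ (es.foldl (pvStepA b k) (acc, q)).1 := by
  intro es
  induction es with
  | nil => intro acc q x hx; exact Or.inl hx
  | cons e es ih =>
    intro acc q x hx
    obtain ⟨n, c⟩ := e
    simp only [List.foldl_cons, pvStepA_eq] at hx ⊢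
    by_cases hcond : (pvPassB b k c && !PySem.Set.contains acc n) = true
    · rw [if_pos hcond] at hx ⊢
      rcases ih _ _ _ hx with h | h
      · rcases List.mem_append.mp h with h | h
        · exact Or.inl h
        · have hxn : x = n := by simpa using h
          subst hxn
          refine Or.inr (pvFoldA_grow b k es _ _ x ?_)
          rw [PySem.Set.add_eq_ite]
          split
          · assumption
          · exact List.mem_append_right _ (by simp)
      · exact Or.inr h
    · rw [if_neg hcond] at hx ⊢
      exact ih _ _ _ hx

theorem pvFoldA_closed (b : List (Int × Int)) (k : List Int) :
    ∀ (es : List (Int × Int)) (acc q : List Int) (v c : Int),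
      (v, c) ∈ es → pvPassB b k c = true →
      v ∈ (es.foldl (pvStepA b k) (acc, q)).1 := by
  intro es
  induction es with
  | nil => intro acc q v c hm; simp at hm
  | cons e es ih =>
    intro acc q v c hm hp
    obtain ⟨n, c'⟩ := e
    rcases List.mem_cons.mp hm with h | h
    · rw [Prod.mk.injEq] at h
      obtain ⟨rfl, rfl⟩ := h
      simp only [List.foldl_cons, pvStepA_eq, hp, Bool.true_and]
      by_cases hc : PySem.Set.contains acc v = true
      · simp only [hc, Bool.not_true, if_neg (by simp : ¬(false = true))]
        exact pvFoldA_grow b k es _ _ v ((PySem.Set.contains_iff acc v).mp hc)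
      · rw [Bool.not_eq_true] at hc
        simp only [hc, Bool.not_false, if_true]
        refine pvFoldA_grow b k es _ _ v ?_
        rw [PySem.Set.add_eq_ite]
        split
        · assumption
        · exact List.mem_append_right _ (by simp)
    · simp only [List.foldl_cons]
      exact ih _ _ _ _ h hp

theorem pvFoldA_origin (b : List (Int × Int)) (k : List Int) :
    ∀ (es : List (Int × Int)) (acc q : List Int) (x : Int),
      x ∈ (es.foldl (pvStepA b k) (acc, q)).1 →
      x ∈ acc ∨ ((∃ c, (x, c) ∈ es ∧ pvPassB b k c = true) ∧ x ∈ (es.foldl (pvStepA b k) (acc, q)).2) := by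
  intro es
  induction es with
  | nil => intro acc q x hx; exact Or.inl hx
  | cons e es ih =>
    intro acc q x hx
    obtain ⟨n, c⟩ := e
    simp only [List.foldl_cons, pvStepA_eq] at hx ⊢
    by_cases hcond : (pvPassB b k c && !PySem.Set.contains acc n) = true
    · rw [if_pos hcond] at hx ⊢
      rw [Bool.and_eq_true] at hcond
      rcases ih _ _ _ hx with h | h
      · rw [PySem.Set.add_eq_ite] at h
        split at h
        · exact Or.inl h
        · rcases List.mem_append.mp h with h | h
          · exact Or.inl h
          · have hxn : x = n := by simpa using h
            subst hxn
            exact Or.inr ⟨⟨c, List.mem_cons_self, hcond.1⟩,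
              pvFoldA_queue_grow b k es _ _ x (List.mem_append_right _ (by simp))⟩
      · obtain ⟨⟨c', hc1, hc2⟩, h2⟩ := h
        exact Or.inr ⟨⟨c', List.mem_cons_of_mem _ hc1, hc2⟩, h2⟩
    · rw [if_neg hcond] at hx ⊢
      rcases ih _ _ _ hx with h | h
      · exact Or.inl h
      · obtain ⟨⟨c', hc1, hc2⟩, h2⟩ := h
        exact Or.inr ⟨⟨c', List.mem_cons_of_mem _ hc1, hc2⟩, h2⟩

theorem pvFoldA_nodup (b : List (Int × Int)) (k : List Int) :
    ∀ (es : List (Int × Int)) (acc q : List Int), acc.Nodup →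
      (es.foldl (pvStepA b k) (acc, q)).1.Nodup := by
  intro es
  induction es with
  | nil => intro acc q h; exact h
  | cons e es ih =>
    intro acc q h
    obtain ⟨n, c⟩ := e
    simp only [List.foldl_cons, pvStepA_eq]
    by_cases hcond : (pvPassB b k c && !PySem.Set.contains acc n) = true
    · rw [if_pos hcond]
      refine ih _ _ ?_
      rw [Bool.and_eq_true] at hcond
      have hn : n ∉ acc := by
        intro hm
        rw [(PySem.Set.contains_iff acc n).mpr hm] at hcond
        simp at hcond
      rw [PySem.Set.add_of_not_mem hn]
      simpa [List.nodup_append] using ⟨h, fun a ha han => hn (han ▸ ha)⟩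
    · rw [if_neg hcond]
      exact ih _ _ h

theorem pvFoldA_count (graph : List (Int × List (Int × Int))) (b : List (Int × Int)) (k : List Int) :
    ∀ (es : List (Int × Int)) (acc q : List Int), (∀ p ∈ es, p.1 ∈ pvU graph) →
      (es.foldl (pvStepA b k) (acc, q)).2.length + pvI graph acc
        = q.length + pvI graph (es.foldl (pvStepA b k) (acc, q)).1 := by
  intro es
  induction es with
  | nil => intro acc q h; rfl
  | cons e es ih =>
    intro acc q h
    obtain ⟨n, c⟩ := e
    simp only [List.foldl_cons, pvStepA_eq]
    by_cases hcond : (pvPassB b k c && !PySem.Set.contains acc n) = true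
    · rw [if_pos hcond]
      rw [Bool.and_eq_true] at hcond
      have hn : n ∉ acc := by
        intro hm
        rw [(PySem.Set.contains_iff acc n).mpr hm] at hcond
        simp at hcond
      have hnU : n ∈ pvU graph := h (n, c) List.mem_cons_self
      have hadd : pvI graph (PySem.Set.add acc n) = pvI graph acc + 1 := by
        rw [PySem.Set.add_of_not_mem hn]
        unfold pvI
        rw [List.toFinset_append, Finset.union_inter_distrib_right]
        have hsing : ([n].toFinset : Finset Int) = {n} := by simp
        rw [hsing, Finset.singleton_inter_of_mem (List.mem_toFinset.mpr hnU),
          Finset.union_singleton,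
          Finset.card_insert_of_notMem (by simp [hn])]
      have := ih (PySem.Set.add acc n) (q ++ [n]) (fun p hp => h p (List.mem_cons_of_mem _ hp))
      rw [List.length_append] at this
      simp only [List.length_cons, List.length_nil] at this
      omega
    · rw [if_neg hcond]
      exact ih acc q (fun p hp => h p (List.mem_cons_of_mem _ hp))

-- ---- characterization of A's BFS result ----

theorem pvBfsA_char (graph : List (Int × List (Int × Int))) (b : List (Int × Int)) (k : List Int)
    (R : Int → Prop) (hR : ∀ u v, R u → pvE graph b k u v → R v) :
    ∀ (fuel : Nat) (acc q : List Int), pvM graph acc q ≤ fuel →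
      (∀ x ∈ q, x ∈ acc) → acc.Nodup → (∀ x ∈ acc, R x) →
      (∀ u ∈ acc, u ∈ q ∨ ∀ v, pvE graph b k u v → v ∈ acc) →
      (∀ x ∈ acc, x ∈ pvBfsA graph b k fuel acc q)
      ∧ (∀ x ∈ pvBfsA graph b k fuel acc q, R x)
      ∧ (pvBfsA graph b k fuel acc q).Nodup
      ∧ (∀ u ∈ pvBfsA graph b k fuel acc q, ∀ v, pvE graph b k u v →
          v ∈ pvBfsA graph b k fuel acc q) := by
  intro fuel
  induction fuel with
  | zero =>
    intro acc q hm hq hnd hRacc hInv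
    have hqnil : q = [] := List.eq_nil_of_length_eq_zero (by unfold pvM at hm; omega)
    subst hqnil
    refine ⟨fun x hx => hx, hRacc, hnd, fun u hu v hEv => ?_⟩
    rcases hInv u hu with h | h
    · simp at h
    · exact h v hEv
  | succ f ih =>
    intro acc q hm hq hnd hRacc hInv
    cases q with
    | nil =>
      refine ⟨fun x hx => hx, hRacc, hnd, fun u hu v hEv => ?_⟩
      rcases hInv u hu with h | h
      · simp at h
      · exact h v hEv
    | cons current rest =>
      simp only [pvBfsA]
      have hadj : ∀ p ∈ (PySem.Dict.mk graph).getD current [], p.1 ∈ pvU graph :=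
        pv_adj_subset graph current
      have hgrow : ∀ x ∈ acc,
          x ∈ (((PySem.Dict.mk graph).getD current []).foldl (pvStepA b k) (acc, rest)).1 :=
        fun x hx => pvFoldA_grow b k _ acc rest x hx
      have hcnt := pvFoldA_count graph b k ((PySem.Dict.mk graph).getD current []) acc rest hadj
      have hIm := pvI_mono graph hgrow
      have hIle := pvI_le graph (((PySem.Dict.mk graph).getD current []).foldl (pvStepA b k) (acc, rest)).1
      have hIle0 := pvI_le graph acc
      have hq' : ∀ x ∈ (((PySem.Dict.mk graph).getD current []).foldl (pvStepA b k) (acc, rest)).2,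
          x ∈ (((PySem.Dict.mk graph).getD current []).foldl (pvStepA b k) (acc, rest)).1 := by
        intro x hx
        rcases pvFoldA_queue b k _ acc rest x hx with h | h
        · exact hgrow x (hq x (List.mem_cons_of_mem _ h))
        · exact h
      have hcur : current ∈ acc := hq current List.mem_cons_self
      have hR' : ∀ x ∈ (((PySem.Dict.mk graph).getD current []).foldl (pvStepA b k) (acc, rest)).1, R x := by
        intro x hx
        rcases pvFoldA_origin b k _ acc rest x hx with h | h
        · exact hRacc x h
        · obtain ⟨⟨c, hc1, hc2⟩, _⟩ := h
          exact hR current x (hRacc current hcur) ⟨c, hc1, hc2⟩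
      have hInv' : ∀ u ∈ (((PySem.Dict.mk graph).getD current []).foldl (pvStepA b k) (acc, rest)).1,
          u ∈ (((PySem.Dict.mk graph).getD current []).foldl (pvStepA b k) (acc, rest)).2
          ∨ ∀ v, pvE graph b k u v →
              v ∈ (((PySem.Dict.mk graph).getD current []).foldl (pvStepA b k) (acc, rest)).1 := by
        intro u hu
        rcases pvFoldA_origin b k _ acc rest u hu with h | h
        · rcases hInv u h with h2 | h2
          · rcases List.mem_cons.mp h2 with h3 | h3
            · subst h3
              right
              intro v hEv
              obtain ⟨c, hc1, hc2⟩ := hEv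
              exact pvFoldA_closed b k _ acc rest v c hc1 hc2
            · exact Or.inl (pvFoldA_queue_grow b k _ acc rest u h3)
          · right
            intro v hEv
            exact hgrow v (h2 v hEv)
        · exact Or.inl h.2
      have := ih (((PySem.Dict.mk graph).getD current []).foldl (pvStepA b k) (acc, rest)).1
        (((PySem.Dict.mk graph).getD current []).foldl (pvStepA b k) (acc, rest)).2
        (by unfold pvM at hm ⊢; simp only [List.length_cons] at hm; omega)
        hq' (pvFoldA_nodup b k _ acc rest hnd) hR' hInv'
      exact ⟨fun x hx => this.1 x (hgrow x hx), this.2.1, this.2.2.1, this.2.2.2⟩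

-- ---- properties of B's edge fold ----

theorem pvFoldB_grow (b : List (Int × Int)) (k : List Int) :
    ∀ (es : List (Int × Int)) (acc : List Int) (ch : Bool) (x : Int), x ∈ acc →
      x ∈ (es.foldl (pvEdgeB b k) (acc, ch)).1 := by
  intro es
  induction es with
  | nil => intro acc ch x hx; exact hx
  | cons e es ih =>
    intro acc ch x hx
    obtain ⟨n, c⟩ := e
    simp only [List.foldl_cons, pvEdgeB]
    by_cases hcond : (pvPassB b k c && !PySem.Set.contains acc n) = true
    · rw [if_pos hcond]
      refine ih _ _ _ ?_
      rw [PySem.Set.add_eq_ite]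
      split
      · exact hx
      · exact List.mem_append_left _ hx
    · rw [if_neg hcond]
      exact ih _ _ _ hx

theorem pvFoldB_origin (b : List (Int × Int)) (k : List Int) :
    ∀ (es : List (Int × Int)) (acc : List Int) (ch : Bool) (x : Int),
      x ∈ (es.foldl (pvEdgeB b k) (acc, ch)).1 →
      x ∈ acc ∨ ∃ c, (x, c) ∈ es ∧ pvPassB b k c = true := by
  intro es
  induction es with
  | nil => intro acc ch x hx; exact Or.inl hx
  | cons e es ih =>
    intro acc ch x hx
    obtain ⟨n, c⟩ := e
    simp only [List.foldl_cons, pvEdgeB] at hx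
    by_cases hcond : (pvPassB b k c && !PySem.Set.contains acc n) = true
    · rw [if_pos hcond] at hx
      rw [Bool.and_eq_true] at hcond
      rcases ih _ _ _ hx with h | h
      · rw [PySem.Set.add_eq_ite] at h
        split at h
        · exact Or.inl h
        · rcases List.mem_append.mp h with h | h
          · exact Or.inl h
          · have hxn : x = n := by simpa using h
            subst hxn
            exact Or.inr ⟨c, List.mem_cons_self, hcond.1⟩
      · obtain ⟨c', h1, h2⟩ := h
        exact Or.inr ⟨c', List.mem_cons_of_mem _ h1, h2⟩
    · rw [if_neg hcond] at hx
      rcases ih _ _ _ hx with h | h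
      · exact Or.inl h
      · obtain ⟨c', h1, h2⟩ := h
        exact Or.inr ⟨c', List.mem_cons_of_mem _ h1, h2⟩

theorem pvFoldB_nodup (b : List (Int × Int)) (k : List Int) :
    ∀ (es : List (Int × Int)) (acc : List Int) (ch : Bool), acc.Nodup →
      (es.foldl (pvEdgeB b k) (acc, ch)).1.Nodup := by
  intro es
  induction es with
  | nil => intro acc ch h; exact h
  | cons e es ih =>
    intro acc ch h
    obtain ⟨n, c⟩ := e
    simp only [List.foldl_cons, pvEdgeB]
    by_cases hcond : (pvPassB b k c && !PySem.Set.contains acc n) = true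
    · rw [if_pos hcond]
      refine ih _ _ ?_
      rw [Bool.and_eq_true] at hcond
      have hn : n ∉ acc := by
        intro hm
        rw [(PySem.Set.contains_iff acc n).mpr hm] at hcond
        simp at hcond
      rw [PySem.Set.add_of_not_mem hn]
      simpa [List.nodup_append] using ⟨h, fun a ha han => hn (han ▸ ha)⟩
    · rw [if_neg hcond]
      exact ih _ _ h

theorem pvFoldB_stays_true (b : List (Int × Int)) (k : List Int) :
    ∀ (es : List (Int × Int)) (acc : List Int),
      (es.foldl (pvEdgeB b k) (acc, true)).2 = true := by
  intro es
  induction es with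
  | nil => intro acc; rfl
  | cons e es ih =>
    intro acc
    obtain ⟨n, c⟩ := e
    simp only [List.foldl_cons, pvEdgeB]
    by_cases hcond : (pvPassB b k c && !PySem.Set.contains acc n) = true
    · rw [if_pos hcond]; exact ih _
    · rw [if_neg hcond]; exact ih _

theorem pvFoldB_done (b : List (Int × Int)) (k : List Int) :
    ∀ (es : List (Int × Int)) (acc : List Int),
      (es.foldl (pvEdgeB b k) (acc, false)).2 = false →
      (es.foldl (pvEdgeB b k) (acc, false)).1 = acc
        ∧ ∀ v c, (v, c) ∈ es → pvPassB b k c = true → v ∈ acc := by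
  intro es
  induction es with
  | nil => intro acc _; exact ⟨rfl, by simp⟩
  | cons e es ih =>
    intro acc hf
    obtain ⟨n, c⟩ := e
    simp only [List.foldl_cons, pvEdgeB] at hf ⊢
    by_cases hcond : (pvPassB b k c && !PySem.Set.contains acc n) = true
    · rw [if_pos hcond] at hf
      rw [pvFoldB_stays_true b k es _] at hf
      exact absurd hf (by simp)
    · rw [if_neg hcond] at hf ⊢
      obtain ⟨h1, h2⟩ := ih acc hf
      refine ⟨h1, fun v c' hm hp => ?_⟩
      rcases List.mem_cons.mp hm with h | h
      · rw [Prod.mk.injEq] at h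
        obtain ⟨rfl, rfl⟩ := h
        by_contra hn
        apply hcond
        rw [Bool.and_eq_true]
        refine ⟨hp, ?_⟩
        rw [Bool.not_eq_true', Bool.eq_false_iff]
        intro hcn
        exact hn ((PySem.Set.contains_iff acc v).mp hcn)
      · exact h2 v c' h hp

theorem pvFoldB_progress (b : List (Int × Int)) (k : List Int) :
    ∀ (es : List (Int × Int)) (acc : List Int),
      (es.foldl (pvEdgeB b k) (acc, false)).2 = true →
      ∃ x, x ∈ (es.foldl (pvEdgeB b k) (acc, false)).1 ∧ x ∉ acc ∧ ∃ c, (x, c) ∈ es := by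
  intro es
  induction es with
  | nil => intro acc h; exact absurd h (by simp [List.foldl])
  | cons e es ih =>
    intro acc h
    obtain ⟨n, c⟩ := e
    simp only [List.foldl_cons, pvEdgeB] at h ⊢
    by_cases hcond : (pvPassB b k c && !PySem.Set.contains acc n) = true
    · rw [if_pos hcond] at h ⊢
      rw [Bool.and_eq_true] at hcond
      have hn : n ∉ acc := by
        intro hm
        rw [(PySem.Set.contains_iff acc n).mpr hm] at hcond
        simp at hcond
      refine ⟨n, ?_, hn, c, List.mem_cons_self⟩
      refine pvFoldB_grow b k es _ _ n ?_
      rw [PySem.Set.add_of_not_mem hn]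
      exact List.mem_append_right _ (by simp)
    · rw [if_neg hcond] at h ⊢
      obtain ⟨x, h1, h2, c', h3⟩ := ih acc h
      exact ⟨x, h1, h2, c', List.mem_cons_of_mem _ h3⟩

-- ---- properties of B's room sweep ----

theorem pvRoomsB_grow (graph : List (Int × List (Int × Int))) (b : List (Int × Int)) (k : List Int) :
    ∀ (rooms : List Int) (st : List Int × Bool) (x : Int), x ∈ st.1 →
      x ∈ (rooms.foldl (pvRoomB graph b k) st).1 := by
  intro rooms
  induction rooms with
  | nil => intro st x hx; exact hx
  | cons room rooms ih =>
    intro st x hx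
    simp only [List.foldl_cons, pvRoomB]
    exact ih _ x (pvFoldB_grow b k _ st.1 st.2 x hx)

theorem pvRoomsB_sound (graph : List (Int × List (Int × Int))) (b : List (Int × Int)) (k : List Int)
    (R : Int → Prop) (hR : ∀ u v, R u → pvE graph b k u v → R v) :
    ∀ (rooms : List Int) (st : List Int × Bool), (∀ x ∈ st.1, R x) → (∀ room ∈ rooms, R room) →
      ∀ x ∈ (rooms.foldl (pvRoomB graph b k) st).1, R x := by
  intro rooms
  induction rooms with
  | nil => intro st hst _ x hx; exact hst x hx
  | cons room rooms ih =>
    intro st hst hrooms x hx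
    simp only [List.foldl_cons, pvRoomB] at hx
    refine ih _ ?_ (fun r hr => hrooms r (List.mem_cons_of_mem _ hr)) x hx
    intro y hy
    rcases pvFoldB_origin b k _ st.1 st.2 y hy with h | h
    · exact hst y h
    · exact hR room y (hrooms room List.mem_cons_self) h

theorem pvRoomsB_nodup (graph : List (Int × List (Int × Int))) (b : List (Int × Int)) (k : List Int) :
    ∀ (rooms : List Int) (st : List Int × Bool), st.1.Nodup →
      (rooms.foldl (pvRoomB graph b k) st).1.Nodup := by
  intro rooms
  induction rooms with
  | nil => intro st h; exact h
  | cons room rooms ih =>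
    intro st h
    simp only [List.foldl_cons, pvRoomB]
    exact ih _ (pvFoldB_nodup b k _ st.1 st.2 h)

theorem pvRoomsB_done (graph : List (Int × List (Int × Int))) (b : List (Int × Int)) (k : List Int) :
    ∀ (rooms : List Int) (acc : List Int),
      (rooms.foldl (pvRoomB graph b k) (acc, false)).2 = false →
      (rooms.foldl (pvRoomB graph b k) (acc, false)).1 = acc
        ∧ ∀ room ∈ rooms, ∀ v, pvE graph b k room v → v ∈ acc := by
  intro rooms
  induction rooms with
  | nil => intro acc _; exact ⟨rfl, by simp⟩
  | cons room rooms ih =>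
    intro acc hf
    simp only [List.foldl_cons, pvRoomB] at hf ⊢
    by_cases hch : (((PySem.Dict.mk graph).getD room []).foldl (pvEdgeB b k) (acc, false)).2 = true
    · exfalso
      have hpair : ((PySem.Dict.mk graph).getD room []).foldl (pvEdgeB b k) (acc, false)
          = ((((PySem.Dict.mk graph).getD room []).foldl (pvEdgeB b k) (acc, false)).1, true) :=
        Prod.ext rfl hch
      rw [hpair] at hf
      -- lift stays_true through the remaining rooms
      have hstay : ∀ (rs : List Int) (a : List Int),
          (rs.foldl (pvRoomB graph b k) (a, true)).2 = true := by
        intro rs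
        induction rs with
        | nil => intro a; rfl
        | cons r rs ih2 =>
          intro a
          simp only [List.foldl_cons, pvRoomB]
          have hstt : (((PySem.Dict.mk graph).getD r []).foldl (pvEdgeB b k) (a, true)).2 = true :=
            pvFoldB_stays_true b k ((PySem.Dict.mk graph).getD r []) a
          have h2 : ((PySem.Dict.mk graph).getD r []).foldl (pvEdgeB b k) (a, true)
              = ((((PySem.Dict.mk graph).getD r []).foldl (pvEdgeB b k) (a, true)).1, true) :=
            Prod.ext rfl hstt
          rw [h2]
          exact ih2 _
      rw [hstay] at hf
      exact absurd hf (by simp)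
    · rw [Bool.not_eq_true] at hch
      have hpair : ((PySem.Dict.mk graph).getD room []).foldl (pvEdgeB b k) (acc, false)
          = ((((PySem.Dict.mk graph).getD room []).foldl (pvEdgeB b k) (acc, false)).1, false) :=
        Prod.ext rfl hch
      obtain ⟨h1, h2⟩ := pvFoldB_done b k _ acc hch
      rw [hpair, h1] at hf ⊢
      obtain ⟨h3, h4⟩ := ih acc hf
      refine ⟨h3, fun r hr v hEv => ?_⟩
      rcases List.mem_cons.mp hr with h | h
      · subst h
        obtain ⟨c, hc1, hc2⟩ := hEv
        exact h2 v c hc1 hc2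
      · exact h4 r h v hEv

theorem pvRoomsB_progress (graph : List (Int × List (Int × Int))) (b : List (Int × Int)) (k : List Int) :
    ∀ (rooms : List Int) (acc : List Int),
      (rooms.foldl (pvRoomB graph b k) (acc, false)).2 = true →
      ∃ x, x ∈ (rooms.foldl (pvRoomB graph b k) (acc, false)).1 ∧ x ∉ acc ∧ x ∈ pvU graph := by
  intro rooms
  induction rooms with
  | nil => intro acc h; exact absurd h (by simp [List.foldl])
  | cons room rooms ih =>
    intro acc h
    simp only [List.foldl_cons, pvRoomB] at h ⊢
    by_cases hch : (((PySem.Dict.mk graph).getD room []).foldl (pvEdgeB b k) (acc, false)).2 = true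
    · obtain ⟨x, h1, h2, c, h3⟩ := pvFoldB_progress b k _ acc hch
      refine ⟨x, ?_, h2, pv_adj_subset graph room (x, c) h3⟩
      have hpair : ((PySem.Dict.mk graph).getD room []).foldl (pvEdgeB b k) (acc, false)
          = ((((PySem.Dict.mk graph).getD room []).foldl (pvEdgeB b k) (acc, false)).1, true) :=
        Prod.ext rfl hch
      rw [hpair]
      exact pvRoomsB_grow graph b k rooms _ x h1
    · rw [Bool.not_eq_true] at hch
      have hpair : ((PySem.Dict.mk graph).getD room []).foldl (pvEdgeB b k) (acc, false)
          = ((((PySem.Dict.mk graph).getD room []).foldl (pvEdgeB b k) (acc, false)).1, false) :=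
        Prod.ext rfl hch
      obtain ⟨h1, _⟩ := pvFoldB_done b k _ acc hch
      rw [hpair, h1] at h ⊢
      exact ih acc h

-- ---- characterization of B's saturation result ----

theorem pvSatB_char (graph : List (Int × List (Int × Int))) (b : List (Int × Int)) (k : List Int)
    (R : Int → Prop) (hR : ∀ u v, R u → pvE graph b k u v → R v) :
    ∀ (fuel : Nat) (acc : List Int),
      (pvU graph).toFinset.card + 1 - pvI graph acc ≤ fuel →
      acc.Nodup → (∀ x ∈ acc, R x) →
      (∀ x ∈ acc, x ∈ pvSatB graph b k fuel acc)
      ∧ (∀ x ∈ pvSatB graph b k fuel acc, R x)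
      ∧ (pvSatB graph b k fuel acc).Nodup
      ∧ (∀ u ∈ pvSatB graph b k fuel acc, ∀ v, pvE graph b k u v →
          v ∈ pvSatB graph b k fuel acc) := by
  intro fuel
  induction fuel with
  | zero =>
    intro acc hm
    have := pvI_le graph acc
    omega
  | succ f ih =>
    intro acc hm hnd hRacc
    simp only [pvSatB]
    by_cases hch : (acc.foldl (pvRoomB graph b k) (acc, false)).2 = true
    · rw [if_pos hch]
      have hgrow : ∀ x ∈ acc, x ∈ (acc.foldl (pvRoomB graph b k) (acc, false)).1 :=
        fun x hx => pvRoomsB_grow graph b k acc (acc, false) x hx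
      obtain ⟨y, hy1, hy2, hyU⟩ := pvRoomsB_progress graph b k acc acc hch
      have hI : pvI graph acc + 1 ≤ pvI graph (acc.foldl (pvRoomB graph b k) (acc, false)).1 := by
        have hsub : insert y (acc.toFinset ∩ (pvU graph).toFinset)
            ⊆ (acc.foldl (pvRoomB graph b k) (acc, false)).1.toFinset ∩ (pvU graph).toFinset := by
          intro z hz
          rcases Finset.mem_insert.mp hz with h | h
          · subst h
            exact Finset.mem_inter.mpr ⟨List.mem_toFinset.mpr hy1, List.mem_toFinset.mpr hyU⟩
          · rw [Finset.mem_inter] at h ⊢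
            exact ⟨List.mem_toFinset.mpr (hgrow z (List.mem_toFinset.mp h.1)), h.2⟩
        have hcard := Finset.card_le_card hsub
        rw [Finset.card_insert_of_notMem (by
          intro hmem
          exact hy2 (List.mem_toFinset.mp (Finset.mem_inter.mp hmem).1))] at hcard
        exact hcard
      have := ih (acc.foldl (pvRoomB graph b k) (acc, false)).1
        (by omega)
        (pvRoomsB_nodup graph b k acc (acc, false) hnd)
        (pvRoomsB_sound graph b k R hR acc (acc, false) hRacc hRacc)
      exact ⟨fun x hx => this.1 x (hgrow x hx), this.2.1, this.2.2.1, this.2.2.2⟩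
    · rw [if_neg hch]
      rw [Bool.not_eq_true] at hch
      obtain ⟨h1, h2⟩ := pvRoomsB_done graph b k acc acc hch
      rw [h1]
      exact ⟨fun x hx => hx, hRacc, hnd, fun u hu v hEv => h2 u hu v hEv⟩

-- ===== VERDICT (by name: the statement is the Claim_ definition above) =====
theorem get_accessible_rooms_with_keys_py_spec : Claim_equal_get_accessible_rooms_with_keys_py := by
  intro graph start_room b k hDom _hPre
  unfold Spec_get_accessible_rooms_with_keys_py get_accessible_rooms_with_keys_py
    get_accessible_rooms_with_keys_py_alt
  have hstartA : PySem.Set.add PySem.Set.empty start_room = [start_room] := rfl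
  have hstartB : PySem.Set.ofList [start_room] = [start_room] := rfl
  rw [hstartA, hstartB]
  have hR : ∀ u v, pvReach graph b k start_room u → pvE graph b k u v →
      pvReach graph b k start_room v := fun u v hu hE => pvReach.tail hu hE
  have hlenU : (graph.flatMap (fun p => p.2.map Prod.fst)).length = (pvU graph).length := rfl
  have hsum : (pvU graph).length = (graph.map (fun p => p.2.length)).sum := by
    simp [pvU]
  have hcard : (pvU graph).toFinset.card ≤ (pvU graph).length := List.toFinset_card_le _
  have hA := pvBfsA_char graph b k (pvReach graph b k start_room) hR
    (2 * (graph.flatMap (fun p => p.2.map Prod.fst)).length + 2) [start_room] [start_room]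
    (by
      unfold pvM
      have := pvI_le graph [start_room]
      simp only [List.length_cons, List.length_nil, hlenU]
      omega)
    (fun x hx => hx) (by simp)
    (by
      intro x hx
      have : x = start_room := by simpa using hx
      subst this
      exact pvReach.refl)
    (fun u hu => Or.inl hu)
  have hB := pvSatB_char graph b k (pvReach graph b k start_room) hR
    ((graph.map (fun p => p.2.length)).sum + 2) [start_room]
    (by omega)
    (by simp)
    (by
      intro x hx
      have : x = start_room := by simpa using hx
      subst this
      exact pvReach.refl)
  obtain ⟨hA1, hA2, hA3, hA4⟩ := hA
  obtain ⟨hB1, hB2, hB3, hB4⟩ := hB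
  have hcompleteA : ∀ x, pvReach graph b k start_room x →
      x ∈ pvBfsA graph b k (2 * (graph.flatMap (fun p => p.2.map Prod.fst)).length + 2)
        [start_room] [start_room] := by
    intro x hx
    induction hx with
    | refl => exact hA1 start_room (by simp)
    | tail h1 h2 ih => exact hA4 _ ih _ h2
  have hcompleteB : ∀ x, pvReach graph b k start_room x →
      x ∈ pvSatB graph b k ((graph.map (fun p => p.2.length)).sum + 2) [start_room] := by
    intro x hx
    induction hx with
    | refl => exact hB1 start_room (by simp)
    | tail h1 h2 ih => exact hB4 _ ih _ h2
  have hperm : (pvBfsA graph b k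
      (2 * (graph.flatMap (fun p => p.2.map Prod.fst)).length + 2) [start_room] [start_room]).Perm
      (pvSatB graph b k ((graph.map (fun p => p.2.length)).sum + 2) [start_room]) := by
    refine List.perm_of_nodup_nodup_toFinset_eq hA3 hB3 ?_
    ext z
    simp only [List.mem_toFinset]
    constructor
    · intro hx; exact hcompleteB z (hA2 z hx)
    · intro hx; exact hcompleteA z (hB2 z hx)
  exact PySem.List.sorted_eq_sorted_of_perm _ _ _ (fun a b h => h) hperm
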